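-- pv_equiv track=rewrite | github.com/fdorssers/advent-of-code | aoc_2023/src/day08.py | determine_distances
-- ===== SOURCE A (Python) =====
-- from collections import defaultdict
--
-- def determine_distances(
--     instructions: list[str], element_map: dict[str, dict[str, str]]
-- ) -> dict[str, int]:
--     starting_positions = [el for el in element_map if el.endswith("A")]
--     distances: dict[str, int] = defaultdict(int)
--     for starting_position in starting_positions:
--         current = starting_position
--         while True:
--             for instruction in instructions:
--                 current = element_map[current][instruction]
--                 distances[starting_position] += 1
--             if current.endswith("Z"):
--                 break
--     return distances
-- ===== SOURCE B (Python) =====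
-- def determine_distances(instructions, element_map):
--     # B: memoized full-instruction-block transition table shared across all starts;
--     # walks in whole blocks and multiplies the block count by len(instructions) at the end.
--     table = {}  # node -> node reached after one full pass over instructions
--
--     def full_block(node):
--         if node not in table:
--             cur = node
--             for instruction in instructions:
--                 cur = element_map[cur][instruction]
--             table[node] = cur
--         return table[node]
--
--     n = len(instructions)
--     distances = {}
--     starting_positions = [el for el in element_map if el.endswith("A")]
--     for start in starting_positions:
--         cur = start
--         blocks = 0
--         while True:
--             cur = full_block(cur)
--             blocks += 1
--             if cur.endswith("Z"):
--                 break
--         distances[start] = blocks * n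
--     return distances
-- ===== Notes on version B (the rewrite author's own statement) =====
-- stated objective: alternative
-- what changed: B memoizes each node's full-instruction-block transition in a table shared across all starts and walks whole blocks, multiplying the block count by len(instructions), instead of A's per-start per-instruction counting walk.
import Mathlib
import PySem

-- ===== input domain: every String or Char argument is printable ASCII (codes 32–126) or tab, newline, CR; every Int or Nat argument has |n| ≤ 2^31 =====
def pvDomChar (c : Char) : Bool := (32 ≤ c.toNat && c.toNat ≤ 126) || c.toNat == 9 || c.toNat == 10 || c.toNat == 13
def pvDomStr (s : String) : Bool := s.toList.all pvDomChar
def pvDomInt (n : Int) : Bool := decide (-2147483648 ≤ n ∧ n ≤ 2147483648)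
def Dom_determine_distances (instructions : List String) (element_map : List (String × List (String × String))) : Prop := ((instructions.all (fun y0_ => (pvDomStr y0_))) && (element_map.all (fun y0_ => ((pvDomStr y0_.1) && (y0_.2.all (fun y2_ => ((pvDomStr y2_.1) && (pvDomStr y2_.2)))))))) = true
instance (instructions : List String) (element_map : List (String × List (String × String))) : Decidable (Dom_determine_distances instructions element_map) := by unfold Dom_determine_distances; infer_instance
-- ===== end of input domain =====

-- B replaces A's per-start, per-instruction counting walk by a memoized full-block transition
-- table shared across all starts, walking whole blocks and multiplying the block count by
-- len(instructions) at the end (objective: alternative — each node's block is traversed once overall).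

-- ===== PORT A =====
-- the input dict[str, dict[str, str]] as a PySem.Dict (duplicate keys collapse exactly as Python's dict does)
def pvInnerMap (element_map : List (String × List (String × String))) :
    PySem.Dict String (PySem.Dict String String) :=
  PySem.Dict.ofList (element_map.map (fun p => (p.1, PySem.Dict.ofList p.2)))

-- element_map[current][instruction]; Python raises KeyError on a missing key — Pre_ excludes that,
-- so the defaults here are never reached on admitted inputs
def pvStep (emap : PySem.Dict String (PySem.Dict String String)) (c ins : String) : String :=
  (emap.getD c PySem.Dict.empty).getD ins ""

-- A's 'while True' loop for one start; fuel bounds the iterations (Pre_ guarantees it suffices)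
def pvLoopA (emap : PySem.Dict String (PySem.Dict String String)) (instructions : List String) :
    Nat → String → Int → Int
  | 0, _, dist => dist
  | f+1, cur, dist =>
    let p := instructions.foldl (fun (q : String × Int) ins => (pvStep emap q.1 ins, q.2 + 1)) (cur, dist)
    if PySem.Str.endswith p.1 "Z" then p.2 else pvLoopA emap instructions f p.1 p.2

def determine_distances (instructions : List String) (element_map : List (String × List (String × String))) : List (String × Int) :=
  let emap := pvInnerMap element_map
  let starting_positions := emap.keys.filter (fun el => PySem.Str.endswith el "A")
  let distances := starting_positions.foldl
    (fun (d : PySem.Dict String Int) sp =>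
      d.insert sp (pvLoopA emap instructions (element_map.length + 2) sp (d.getD sp 0)))
    PySem.Dict.empty
  distances.items

-- ===== PORT B =====
-- one full pass over instructions from node (the body of full_block's miss case)
def pvBlock (emap : PySem.Dict String (PySem.Dict String String)) (instructions : List String)
    (node : String) : String :=
  instructions.foldl (fun c ins => pvStep emap c ins) node

-- full_block(node): memo lookup, else compute and store
def pvFullBlock (emap : PySem.Dict String (PySem.Dict String String)) (instructions : List String)
    (table : PySem.Dict String String) (node : String) : PySem.Dict String String × String :=
  match table.get? node with
  | some v => (table, v)
  | none => let v := pvBlock emap instructions node; (table.insert node v, v)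

-- B's 'while True' loop: counts whole blocks, threading the memo table
def pvWalkB (emap : PySem.Dict String (PySem.Dict String String)) (instructions : List String) :
    Nat → PySem.Dict String String → String → Int → PySem.Dict String String × Int
  | 0, table, _, blocks => (table, blocks)
  | f+1, table, cur, blocks =>
    let r := pvFullBlock emap instructions table cur
    if PySem.Str.endswith r.2 "Z" then (r.1, blocks + 1)
    else pvWalkB emap instructions f r.1 r.2 (blocks + 1)

def determine_distances_alt (instructions : List String) (element_map : List (String × List (String × String))) : List (String × Int) :=
  let emap := pvInnerMap element_map
  let n : Int := instructions.length
  let starting_positions := emap.keys.filter (fun el => PySem.Str.endswith el "A")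
  let res := starting_positions.foldl
    (fun (st : PySem.Dict String String × PySem.Dict String Int) start =>
      let r := pvWalkB emap instructions (element_map.length + 2) st.1 start 0
      (r.1, st.2.insert start (r.2 * n)))
    (PySem.Dict.empty, PySem.Dict.empty)
  res.2.items

-- ===== PRECONDITION & SPEC =====
-- one full block as an Option-valued chain: none exactly where Python's element_map[cur][ins] raises KeyError
def pvBlockStep? (emap : PySem.Dict String (PySem.Dict String String)) (instructions : List String)
    (c : String) : Option String :=
  instructions.foldl
    (fun o ins => o.bind (fun c => (emap.get? c).bind (fun inner => inner.get? ins))) (some c)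

-- after k full blocks from sp, did we land (without any KeyError) on a node ending in "Z"?
def pvReachZ (emap : PySem.Dict String (PySem.Dict String String)) (instructions : List String)
    (sp : String) (k : Nat) : Bool :=
  match (fun o => Option.bind o (pvBlockStep? emap instructions))^[k] (some sp) with
  | some z => PySem.Str.endswith z "Z"
  | none => false

-- Pre_ = exactly the inputs where A returns: from every 'A'-ending key the block walk reaches a
-- 'Z'-ending node with no missing key (otherwise A raises KeyError or loops forever); by
-- pigeonhole a terminating walk reaches it within length+2 blocks, so no returning input is excluded.
def Pre_determine_distances (instructions : List String) (element_map : List (String × List (String × String))) : Prop :=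
  ∀ p ∈ element_map, PySem.Str.endswith p.1 "A" = true →
    ∃ k < element_map.length + 3, 1 ≤ k ∧
      pvReachZ (pvInnerMap element_map) instructions p.1 k = true

instance (instructions : List String) (element_map : List (String × List (String × String))) : Decidable (Pre_determine_distances instructions element_map) := by
  unfold Pre_determine_distances; infer_instance

def pvWitness_determine_distances : List String × (List (String × List (String × String))) :=
  (["L"], [("AA", [("L", "ZZ")]), ("ZZ", [("L", "AA")])])

def Spec_determine_distances (instructions : List String) (element_map : List (String × List (String × String))) (out : List (String × Int)) : Prop := out = determine_distances_alt instructions element_map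
instance (instructions : List String) (element_map : List (String × List (String × String))) (out : List (String × Int)) : Decidable (Spec_determine_distances instructions element_map out) := by unfold Spec_determine_distances; infer_instance

-- ===== CLAIM (what is proved, stated in full; the proofs are below) =====
def Claim_equal_determine_distances : Prop := ∀ (instructions : List String) (element_map : List (String × List (String × String))), Dom_determine_distances instructions element_map → Pre_determine_distances instructions element_map → Spec_determine_distances instructions element_map (determine_distances instructions element_map)

-- ===== LEMMAS AND PROOFS =====

-- A's paired fold over instructions = (one full block, count advanced by the block length)
theorem pvFoldPair (emap : PySem.Dict String (PySem.Dict String String))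
    (instructions : List String) (cur : String) (dist : Int) :
    instructions.foldl (fun (q : String × Int) ins => (pvStep emap q.1 ins, q.2 + 1)) (cur, dist)
      = (pvBlock emap instructions cur, dist + instructions.length) := by
  induction instructions generalizing cur dist with
  | nil => simp [pvBlock]
  | cons i t ih =>
      simp only [List.foldl_cons, pvBlock, ih, Prod.mk.injEq, List.length_cons]
      refine ⟨trivial, ?_⟩
      push_cast; ring

-- the Option chain propagates none
theorem pvBlockStep?_none (emap : PySem.Dict String (PySem.Dict String String))
    (instructions : List String) :
    instructions.foldl
      (fun o ins => o.bind (fun c => (emap.get? c).bind (fun inner => inner.get? ins)))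
      (none : Option String) = none := by
  induction instructions with
  | nil => rfl
  | cons i t ih => simpa using ih

-- when the Option chain succeeds, the getD chain computes the same node
theorem pvBlockStep?_some (emap : PySem.Dict String (PySem.Dict String String))
    (instructions : List String) (c z : String)
    (h : pvBlockStep? emap instructions c = some z) :
    pvBlock emap instructions c = z := by
  induction instructions generalizing c with
  | nil => simpa [pvBlockStep?, pvBlock] using h
  | cons i t ih =>
      unfold pvBlockStep? at h
      rw [List.foldl_cons] at h
      simp only [Option.bind_some] at h
      cases h1 : (emap.get? c).bind (fun inner => inner.get? i) with
      | none => rw [h1, pvBlockStep?_none] at h; exact absurd h (by simp)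
      | some c1 =>
          rw [h1] at h
          have hb : pvBlock emap t c1 = z := ih c1 h
          cases h2 : emap.get? c with
          | none => rw [h2] at h1; simp at h1
          | some inner =>
              rw [h2] at h1
              simp only [Option.bind_some] at h1
              unfold pvBlock
              rw [List.foldl_cons]
              have : pvStep emap c i = c1 := by
                simp [pvStep, PySem.Dict.getD_eq_get?_getD, h2, h1]
              rw [this]; exact hb

-- iterating the Option step from none stays none
theorem pvIter_none (emap : PySem.Dict String (PySem.Dict String String))
    (instructions : List String) (k : Nat) :
    (fun o => Option.bind o (pvBlockStep? emap instructions))^[k] (none : Option String) = none :=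
  Function.iterate_fixed rfl k

-- memo-table invariant: every stored value is the true full block of its key
def pvInv (emap : PySem.Dict String (PySem.Dict String String)) (instructions : List String)
    (table : PySem.Dict String String) : Prop :=
  ∀ k v, table.get? k = some v → v = pvBlock emap instructions k

theorem pvFullBlock_spec (emap : PySem.Dict String (PySem.Dict String String))
    (instructions : List String) (table : PySem.Dict String String) (node : String)
    (hinv : pvInv emap instructions table) :
    (pvFullBlock emap instructions table node).2 = pvBlock emap instructions node ∧
      pvInv emap instructions (pvFullBlock emap instructions table node).1 := by
  cases h : table.get? node with
  | some v => simp only [pvFullBlock, h]; exact ⟨hinv node v h, hinv⟩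
  | none =>
      simp only [pvFullBlock, h]
      refine ⟨trivial, ?_⟩
      intro k v hk
      rw [PySem.Dict.get?_insert] at hk
      by_cases hkn : k = node
      · simp [hkn] at hk; rw [← hk, hkn]
      · rw [if_neg hkn] at hk; exact hinv k v hk

-- shifting the iterate by one successful block
theorem pvReachZ_shift (emap : PySem.Dict String (PySem.Dict String String))
    (instructions : List String) (cur c1 : String) (j : Nat)
    (hb : pvBlockStep? emap instructions cur = some c1) :
    pvReachZ emap instructions cur (j + 1) = pvReachZ emap instructions c1 j := by
  unfold pvReachZ
  rw [Function.iterate_succ_apply]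
  simp [hb]

-- the two walk loops, related: A's counts instructions, B's counts blocks (memo table preserved)
theorem pvWalk_eq (emap : PySem.Dict String (PySem.Dict String String))
    (instructions : List String) (k : Nat) :
    ∀ (cur : String) (fuel : Nat) (acc blocks : Int) (table : PySem.Dict String String),
      pvInv emap instructions table →
      1 ≤ k → k ≤ fuel →
      pvReachZ emap instructions cur k = true →
      (∀ j, 1 ≤ j → j < k → pvReachZ emap instructions cur j = false) →
      pvLoopA emap instructions fuel cur acc = acc + k * instructions.length ∧
        (pvWalkB emap instructions fuel table cur blocks).2 = blocks + k ∧
        pvInv emap instructions (pvWalkB emap instructions fuel table cur blocks).1 := by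
  induction k with
  | zero => intro _ _ _ _ _ _ h1; omega
  | succ k ih =>
      intro cur fuel acc blocks table hinv _ hfuel hz hmin
      obtain ⟨f, rfl⟩ : ∃ f, fuel = f + 1 := ⟨fuel - 1, by omega⟩
      -- the first block from cur succeeds
      cases hb : pvBlockStep? emap instructions cur with
      | none =>
          exfalso
          unfold pvReachZ at hz
          rw [Function.iterate_succ_apply] at hz
          simp [hb, pvIter_none] at hz
      | some c1 =>
          have hshift := pvReachZ_shift emap instructions cur c1 k hb
          have hz' : pvReachZ emap instructions c1 k = true := by rw [← hshift]; exact hz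
          have hblock : pvBlock emap instructions cur = c1 := pvBlockStep?_some _ _ _ _ hb
          have hfb := pvFullBlock_spec emap instructions table cur hinv
          have hA1 : pvLoopA emap instructions (f + 1) cur acc
              = if PySem.Str.endswith c1 "Z" = true
                then acc + (instructions.length : Int)
                else pvLoopA emap instructions f c1 (acc + instructions.length) := by
            simp only [pvLoopA, pvFoldPair, hblock]
          have hB1 : pvWalkB emap instructions (f + 1) table cur blocks
              = if PySem.Str.endswith c1 "Z" = true
                then ((pvFullBlock emap instructions table cur).1, blocks + 1)
                else pvWalkB emap instructions f (pvFullBlock emap instructions table cur).1 c1 (blocks + 1) := by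
            simp only [pvWalkB, hfb.1, hblock]
          by_cases hk : k = 0
          · -- base: exactly one block, which ends in "Z"
            subst hk
            have hcz : PySem.Str.endswith c1 "Z" = true := by
              have := pvReachZ_shift emap instructions cur c1 0 hb
              rw [this] at hz
              simpa [pvReachZ] using hz
            refine ⟨?_, ?_, ?_⟩
            · rw [hA1, if_pos hcz]; push_cast; ring
            · rw [hB1, if_pos hcz]; push_cast; ring
            · rw [hB1, if_pos hcz]; exact hfb.2
          · -- step: the first block does not end in "Z"; recurse with k blocks left
            have hk1 : 1 ≤ k := by omega
            have hcz : PySem.Str.endswith c1 "Z" = false := by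
              have h1 := hmin 1 (by omega) (by omega)
              have := pvReachZ_shift emap instructions cur c1 0 hb
              rw [this] at h1
              simpa [pvReachZ] using h1
            have hne : ¬ PySem.Str.endswith c1 "Z" = true := by rw [hcz]; simp
            have hmin' : ∀ j, 1 ≤ j → j < k → pvReachZ emap instructions c1 j = false := by
              intro j hj1 hjk
              have := hmin (j + 1) (by omega) (by omega)
              rwa [pvReachZ_shift emap instructions cur c1 j hb] at this
            have hrec := ih c1 f (acc + instructions.length) (blocks + 1)
              (pvFullBlock emap instructions table cur).1 hfb.2 hk1 (by omega) hz' hmin'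
            refine ⟨?_, ?_, ?_⟩
            · rw [hA1, if_neg hne, hrec.1]; push_cast; ring
            · rw [hB1, if_neg hne, hrec.2.1]; push_cast; ring
            · rw [hB1, if_neg hne]; exact hrec.2.2

-- keys of the converted map are among the original first components
theorem pvMem_keys_innerMap (element_map : List (String × List (String × String))) (x : String)
    (h : x ∈ (pvInnerMap element_map).keys) : ∃ p ∈ element_map, p.1 = x := by
  rw [pvInnerMap, PySem.Dict.ofList, PySem.Dict.update, PySem.Dict.keys_foldl_insert_key,
    PySem.Dict.keys_empty, PySem.Set.update_nil_left, PySem.Set.mem_ofList] at h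
  simp only [List.map_map, List.mem_map] at h
  obtain ⟨p, hp, hpx⟩ := h
  exact ⟨p, hp, hpx⟩

-- from Pre_'s existential, the least block count at which the walk from sp first hits "Z"
theorem pvLeast (emap : PySem.Dict String (PySem.Dict String String)) (instructions : List String)
    (sp : String) (N : Nat)
    (h : ∃ k < N + 3, 1 ≤ k ∧ pvReachZ emap instructions sp k = true) :
    ∃ k, 1 ≤ k ∧ k ≤ N + 2 ∧ pvReachZ emap instructions sp k = true ∧
      ∀ j, 1 ≤ j → j < k → pvReachZ emap instructions sp j = false := by
  obtain ⟨k, hkN, hk1, hkz⟩ := h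
  have hex : ∃ k, 1 ≤ k ∧ pvReachZ emap instructions sp k = true := ⟨k, hk1, hkz⟩
  refine ⟨Nat.find hex, (Nat.find_spec hex).1, ?_, (Nat.find_spec hex).2, ?_⟩
  · have : Nat.find hex ≤ k := Nat.find_le ⟨hk1, hkz⟩
    omega
  · intro j hj1 hjk
    have := Nat.find_min hex hjk
    simp only [not_and] at this
    exact Bool.eq_false_iff.mpr (fun hc => (this hj1) hc)

-- the two result-dict folds agree, start by start (B also threads its memo table)
theorem pvFold_eq (emap : PySem.Dict String (PySem.Dict String String)) (instr : List String)
    (N : Nat) :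
    ∀ (l : List String) (d : PySem.Dict String Int) (table : PySem.Dict String String),
      pvInv emap instr table →
      (∀ sp ∈ l, ∃ k < N + 3, 1 ≤ k ∧ pvReachZ emap instr sp k = true) →
      (∀ sp ∈ l, d.contains sp = false) →
      l.Nodup →
      l.foldl (fun d sp => d.insert sp (pvLoopA emap instr (N + 2) sp (d.getD sp 0))) d
        = (l.foldl (fun st sp =>
            ((pvWalkB emap instr (N + 2) st.1 sp 0).1,
              st.2.insert sp ((pvWalkB emap instr (N + 2) st.1 sp 0).2 * (instr.length : Int))))
            (table, d)).2 := by
  intro l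
  induction l with
  | nil => intros; rfl
  | cons sp t ih =>
      intro d table hinv hl hfresh hnd
      simp only [List.foldl_cons]
      obtain ⟨k, hk1, hk2, hz, hmin⟩ := pvLeast emap instr sp N (hl sp (by simp))
      have hw := pvWalk_eq emap instr k sp (N + 2) (d.getD sp 0) 0 table hinv hk1 hk2 hz hmin
      have h0 : d.getD sp 0 = 0 := PySem.Dict.getD_of_not_contains d 0 (hfresh sp (by simp))
      have hval : pvLoopA emap instr (N + 2) sp (d.getD sp 0)
          = (pvWalkB emap instr (N + 2) table sp 0).2 * (instr.length : Int) := by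
        rw [hw.1, hw.2.1, h0]; ring
      rw [hval]
      apply ih _ _ hw.2.2
      · intro x hx; exact hl x (List.mem_cons_of_mem _ hx)
      · intro x hx
        rw [PySem.Dict.contains_insert]
        have hxs : x ≠ sp := fun hc => (List.nodup_cons.mp hnd).1 (hc ▸ hx)
        simp [hxs, hfresh x (List.mem_cons_of_mem _ hx)]
      · exact (List.nodup_cons.mp hnd).2

-- ===== VERDICT (by name: the statement is the Claim_ definition above) =====
theorem determine_distances_spec : Claim_equal_determine_distances := by
  intro instructions element_map _ hpre
  unfold Spec_determine_distances determine_distances determine_distances_alt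
  have hinv : pvInv (pvInnerMap element_map) instructions PySem.Dict.empty := by
    intro k v h
    rw [PySem.Dict.get?_empty] at h
    exact absurd h (by simp)
  have hnd : ((pvInnerMap element_map).keys.filter
      (fun el => PySem.Str.endswith el "A")).Nodup := by
    apply List.Nodup.filter
    unfold pvInnerMap
    exact PySem.Dict.nodup_keys_ofList _
  have hl : ∀ sp ∈ (pvInnerMap element_map).keys.filter (fun el => PySem.Str.endswith el "A"),
      ∃ k < element_map.length + 3, 1 ≤ k ∧
        pvReachZ (pvInnerMap element_map) instructions sp k = true := by
    intro sp hsp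
    rw [List.mem_filter] at hsp
    obtain ⟨p, hp, hpx⟩ := pvMem_keys_innerMap element_map sp hsp.1
    rw [← hpx]
    exact hpre p hp (by rw [hpx]; exact hsp.2)
  have hfresh : ∀ sp ∈ (pvInnerMap element_map).keys.filter
      (fun el => PySem.Str.endswith el "A"),
      (PySem.Dict.empty : PySem.Dict String Int).contains sp = false := by
    intro sp _; exact PySem.Dict.contains_empty sp
  exact congrArg PySem.Dict.items
    (pvFold_eq (pvInnerMap element_map) instructions element_map.length
      ((pvInnerMap element_map).keys.filter (fun el => PySem.Str.endswith el "A"))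
      PySem.Dict.empty PySem.Dict.empty hinv hl hfresh hnd)
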